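-- pv_equiv track=rewrite | github.com/wonza-hub/Algorithm | 세트/뉴스 클러스터링.py | uni
-- ===== SOURCE A (Python) =====
-- def uni(d1,d2):
--     uni_cnt=0
--     com=[]
--     for k in d1.keys():
--         if k in d2:
--             uni_cnt+=max(d1[k],d2[k])
--             com.append(k)
--     for k in d1.keys():
--         if k not in com:
--             uni_cnt+=d1[k]
--     for k in d2.keys():
--         if k not in com:
--             uni_cnt+=d2[k]
--
--     return uni_cnt
-- ===== SOURCE B (Python) =====
-- def uni(d1, d2):
--     total = sum(d1.values()) + sum(d2.values())
--     for k in d1: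
--         if k in d2:
--             total -= min(d1[k], d2[k])
--     return total
-- ===== Notes on version B (the rewrite author's own statement) =====
-- stated objective: simpler
-- what changed: Replaces A's three loops with a shared 'com' membership list by the inclusion-exclusion identity max(a,b)=a+b-min(a,b): sum all values of both dicts once, then subtract min over the common keys in a single loop.
import Mathlib
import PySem

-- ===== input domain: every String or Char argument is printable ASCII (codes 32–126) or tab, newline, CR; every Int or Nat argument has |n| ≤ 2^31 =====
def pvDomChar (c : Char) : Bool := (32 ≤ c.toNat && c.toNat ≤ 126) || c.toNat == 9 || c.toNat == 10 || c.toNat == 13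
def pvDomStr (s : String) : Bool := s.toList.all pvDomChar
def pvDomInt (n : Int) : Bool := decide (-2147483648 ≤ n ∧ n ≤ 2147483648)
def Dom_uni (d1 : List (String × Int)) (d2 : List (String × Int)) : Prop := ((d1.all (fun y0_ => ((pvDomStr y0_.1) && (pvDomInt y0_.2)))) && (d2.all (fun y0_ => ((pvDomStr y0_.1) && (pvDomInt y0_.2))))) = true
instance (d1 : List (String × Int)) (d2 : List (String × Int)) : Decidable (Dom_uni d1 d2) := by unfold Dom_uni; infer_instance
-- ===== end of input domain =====

-- ===== PORT A =====
-- B changes only the return-value computation; neither program mutates its arguments.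
-- Header: B computes |A∪B| as sum(values)+sum(values) minus min over common keys (inclusion-exclusion), replacing A's three partitioned loops.
def uni (d1 : List (String × Int)) (d2 : List (String × Int)) : Int :=
  let D1 : PySem.Dict String Int := PySem.Dict.mk d1
  let D2 : PySem.Dict String Int := PySem.Dict.mk d2
  -- first loop: accumulate max over common keys and build com
  let s1 : Int × List String :=
    D1.keys.foldl (fun s k =>
      if D2.contains k then (s.1 + max (D1.getD k 0) (D2.getD k 0), s.2 ++ [k]) else s)
      (0, [])
  -- second loop: keys of d1 not in com
  let c2 : Int :=
    D1.keys.foldl (fun c k => if s1.2.contains k then c else c + D1.getD k 0) s1.1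
  -- third loop: keys of d2 not in com
  D2.keys.foldl (fun c k => if s1.2.contains k then c else c + D2.getD k 0) c2

-- ===== PORT B =====
def uni_alt (d1 : List (String × Int)) (d2 : List (String × Int)) : Int :=
  let D1 : PySem.Dict String Int := PySem.Dict.mk d1
  let D2 : PySem.Dict String Int := PySem.Dict.mk d2
  let total : Int := D1.values.sum + D2.values.sum
  D1.keys.foldl (fun t k =>
    if D2.contains k then t - min (D1.getD k 0) (D2.getD k 0) else t) total

-- ===== PRECONDITION & SPEC =====
-- Pre_ excludes association lists with a duplicated key: a Python dict cannot contain one,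
-- so such lists do not represent any input A ever receives.
def Pre_uni (d1 : List (String × Int)) (d2 : List (String × Int)) : Prop :=
  (d1.map Prod.fst).Nodup ∧ (d2.map Prod.fst).Nodup
instance (d1 : List (String × Int)) (d2 : List (String × Int)) : Decidable (Pre_uni d1 d2) := by unfold Pre_uni; infer_instance

def pvWitness_uni : (List (String × Int)) × (List (String × Int)) :=
  ([("a", 2), ("b", 1)], [("b", 3), ("c", 1)])

def Spec_uni (d1 : List (String × Int)) (d2 : List (String × Int)) (out : Int) : Prop := out = uni_alt d1 d2
instance (d1 : List (String × Int)) (d2 : List (String × Int)) (out : Int) : Decidable (Spec_uni d1 d2 out) := by unfold Spec_uni; infer_instance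

-- ===== CLAIM (what is proved, stated in full; the proofs are below) =====
def Claim_equal_uni : Prop := ∀ (d1 : List (String × Int)) (d2 : List (String × Int)), Dom_uni d1 d2 → Pre_uni d1 d2 → Spec_uni d1 d2 (uni d1 d2)

-- ===== LEMMAS AND PROOFS =====

-- A's first loop: the accumulated count and the com list, in closed form.
theorem foldl_phase1 (f : String → Int) (p : String → Bool) :
    ∀ (ks : List String) (c : Int) (com : List String),
      ks.foldl (fun (s : Int × List String) k =>
          if p k then (s.1 + f k, s.2 ++ [k]) else s) (c, com)
        = (c + ((ks.filter p).map f).sum, com ++ ks.filter p) := by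
  intro ks
  induction ks with
  | nil => simp
  | cons k ks ih =>
    intro c com
    by_cases h : p k
    · simp [List.foldl_cons, h, ih, List.append_assoc, add_assoc]
    · simp [List.foldl_cons, h, ih]

-- The 'skip or add' loops of both ports.
theorem foldl_skip_add (f : String → Int) (q : String → Bool) :
    ∀ (ks : List String) (c : Int),
      ks.foldl (fun c k => if q k then c else c + f k) c
        = c + ((ks.filter (fun k => !q k)).map f).sum := by
  intro ks
  induction ks with
  | nil => simp
  | cons k ks ih =>
    intro c
    by_cases h : q k
    · simp [List.foldl_cons, h, ih]
    · simp [List.foldl_cons, h, ih, add_assoc]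

-- B's subtraction loop.
theorem foldl_sub (f : String → Int) (p : String → Bool) :
    ∀ (ks : List String) (c : Int),
      ks.foldl (fun t k => if p k then t - f k else t) c
        = c - ((ks.filter p).map f).sum := by
  intro ks
  induction ks with
  | nil => simp
  | cons k ks ih =>
    intro c
    by_cases h : p k
    · simp [List.foldl_cons, h, ih, sub_sub]
    · simp [List.foldl_cons, h, ih]

-- Sums over two nodup lists with the same members agree.
theorem sum_map_congr_perm (f : String → Int) (l1 l2 : List String)
    (h1 : l1.Nodup) (h2 : l2.Nodup) (h : ∀ a, a ∈ l1 ↔ a ∈ l2) :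
    (l1.map f).sum = (l2.map f).sum := by
  exact List.Perm.sum_eq (List.Perm.map f ((List.perm_ext_iff_of_nodup h1 h2).mpr h))

-- max = a + b - min, summed over a list.
theorem sum_map_max_min (g1 g2 : String → Int) (l : List String) :
    (l.map (fun k => max (g1 k) (g2 k))).sum
      = (l.map g1).sum + (l.map g2).sum - (l.map (fun k => min (g1 k) (g2 k))).sum := by
  induction l with
  | nil => simp
  | cons k l ih =>
    simp only [List.map_cons, List.sum_cons, ih]
    have : max (g1 k) (g2 k) + min (g1 k) (g2 k) = g1 k + g2 k := max_add_min _ _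
    omega

-- a sum splits along a filter.
theorem sum_map_filter_split (f : String → Int) (p : String → Bool) (l : List String) :
    (l.map f).sum = ((l.filter p).map f).sum + ((l.filter (fun k => !p k)).map f).sum := by
  induction l with
  | nil => simp
  | cons k l ih =>
    by_cases h : p k <;> simp [h, ih] <;> ring

-- The core inclusion-exclusion identity on key lists.
theorem main_identity (g1 g2 : String → Int) (A B : List String)
    (hA : A.Nodup) (hB : B.Nodup) :
    ((A.filter (fun k => B.contains k)).map (fun k => max (g1 k) (g2 k))).sum
      + ((A.filter (fun k => !B.contains k)).map g1).sum
      + ((B.filter (fun k => !A.contains k)).map g2).sum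
    = (A.map g1).sum + (B.map g2).sum
      - ((A.filter (fun k => B.contains k)).map (fun k => min (g1 k) (g2 k))).sum := by
  have hswap : ((A.filter (fun k => B.contains k)).map g2).sum
      = ((B.filter (fun k => A.contains k)).map g2).sum := by
    apply sum_map_congr_perm g2 _ _ (hA.filter _) (hB.filter _)
    intro a
    simp [List.mem_filter]
    tauto
  rw [sum_map_max_min g1 g2, sum_map_filter_split g1 (fun k => B.contains k) A,
    sum_map_filter_split g2 (fun k => A.contains k) B, hswap]
  ring

-- Dict.contains of a literal dict is list-key containment.
theorem dict_contains_eq (d : List (String × Int)) (k : String) :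
    (PySem.Dict.mk d).contains k = (d.map Prod.fst).contains k := by
  rw [PySem.Dict.contains_eq_decide_mem_keys]
  simp [PySem.Dict.keys]

-- ===== VERDICT (by name: the statement is the Claim_ definition above) =====
theorem uni_spec : Claim_equal_uni := by
  intro d1 d2 _ hpre
  obtain ⟨h1, h2⟩ := hpre
  unfold Spec_uni uni uni_alt
  simp only []
  have hkeys1 : (PySem.Dict.mk d1 : PySem.Dict String Int).keys = d1.map Prod.fst := by
    simp [PySem.Dict.keys]
  have hkeys2 : (PySem.Dict.mk d2 : PySem.Dict String Int).keys = d2.map Prod.fst := by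
    simp [PySem.Dict.keys]
  rw [hkeys1, hkeys2]
  set A : List String := d1.map Prod.fst with hAdef
  set B : List String := d2.map Prod.fst with hBdef
  -- phase 1 of A in closed form
  rw [foldl_phase1 (fun k => max ((PySem.Dict.mk d1 : PySem.Dict String Int).getD k 0) ((PySem.Dict.mk d2 : PySem.Dict String Int).getD k 0))
      (fun k => (PySem.Dict.mk d2 : PySem.Dict String Int).contains k) A 0 []]
  rw [List.nil_append (A.filter (fun k => (PySem.Dict.mk d2 : PySem.Dict String Int).contains k))]
  -- replace dict contains by list contains in the filter (everywhere, incl. instance args)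
  have hp : A.filter (fun k => (PySem.Dict.mk d2 : PySem.Dict String Int).contains k)
      = A.filter (fun k => B.contains k) := by
    apply List.filter_congr
    intro k _
    exact dict_contains_eq d2 k
  rw [hp]
  set com : List String := A.filter (fun k => B.contains k) with hcom
  -- phases 2 and 3 of A, and B's loop, in closed form
  rw [foldl_skip_add (fun k => (PySem.Dict.mk d1 : PySem.Dict String Int).getD k 0) (fun k => com.contains k) A]
  rw [foldl_skip_add (fun k => (PySem.Dict.mk d2 : PySem.Dict String Int).getD k 0) (fun k => com.contains k) B]
  rw [foldl_sub (fun k => min ((PySem.Dict.mk d1 : PySem.Dict String Int).getD k 0) ((PySem.Dict.mk d2 : PySem.Dict String Int).getD k 0))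
      (fun k => (PySem.Dict.mk d2 : PySem.Dict String Int).contains k) A]
  rw [hp]
  -- values sums
  rw [PySem.Dict.values_eq_map_keys (PySem.Dict.mk d1) (by simpa [PySem.Dict.keys] using h1) 0,
      PySem.Dict.values_eq_map_keys (PySem.Dict.mk d2) (by simpa [PySem.Dict.keys] using h2) 0,
      hkeys1, hkeys2]
  -- the com-membership filters are really "in the other dict" filters
  have hfil2 : A.filter (fun k => !com.contains k) = A.filter (fun k => !B.contains k) := by
    apply List.filter_congr
    intro k hk
    have : com.contains k = B.contains k := by
      by_cases hb : k ∈ B <;> simp [hcom, List.mem_filter, hk, hb]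
    rw [this]
  have hfil3 : B.filter (fun k => !com.contains k) = B.filter (fun k => !A.contains k) := by
    apply List.filter_congr
    intro k hk
    have : com.contains k = A.contains k := by
      by_cases ha : k ∈ A <;> simp [hcom, List.mem_filter, hk, ha]
    rw [this]
  rw [hfil2, hfil3]
  have := main_identity (fun k => (PySem.Dict.mk d1 : PySem.Dict String Int).getD k 0)
      (fun k => (PySem.Dict.mk d2 : PySem.Dict String Int).getD k 0) A B h1 h2
  rw [← hcom] at this
  beta_reduce at this
  dsimp only
  omega
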